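-- pv_equiv track=rewrite | github.com/Nuitka/Nuitka | nuitka/tools/quality/auto_format/YamlFormatter.py | _restoreComments
-- ===== SOURCE A (Python) =====
-- from copy import copy
--
-- def _restoreComments(lines, comments):
--     """
--     restore all comments from "comments"
--     """
--     new_lines = copy(lines)
--     new_lines_counter = 0
--     for i, line in enumerate(lines):
--         if line.startswith("- module-name: "):
--             module_name = line.split(": ")[1]
--             if module_name in comments:
--                 for entry in comments[module_name]:
--                     if entry["type"] == "on-top":
--                         new_lines.insert(i + new_lines_counter, entry["comment"])
--
--                         new_lines_counter += 1
--
--                     if entry["type"] == "between":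
--                         line2 = line
--                         counter = 0
--                         while line2.strip() != entry["key"]:
--                             counter += 1
--                             line2 = lines[i + counter]
--
--                         new_lines.insert(
--                             i + counter + new_lines_counter + 1, entry["comment"]
--                         )
--                         new_lines_counter += 1
--
--                     if entry["type"] == "on-end":
--                         line2 = line
--                         counter = 0
--                         while line2.strip() != entry["key"]:
--                             counter += 1
--                             line2 = lines[i + counter]
--
--                         new_lines[i + counter + new_lines_counter] = (
--                             lines[i + counter] + " " + entry["comment"]
--                         )
--
--     return new_lines
-- ===== SOURCE B (Python) =====
-- def _restoreComments(lines, comments):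
--     """
--     restore all comments from "comments"
--     """
--     # phase 1: compile every comment entry into one fully resolved operation.
--     # key-line resolution uses a stripped-text -> positions index built in one pass;
--     # insert indices are precomputed as (base position + insert rank), so phase 2
--     # needs no counter and no branches on entry types.
--     occ = {}
--     for j, l in enumerate(lines):
--         occ.setdefault(l.strip(), []).append(j)
--
--     ops = []  # ("ins", index, text) inserts / ("set", index, text) overwrites
--     r = 0     # insert rank: number of insert ops compiled so far
--     for i, line in enumerate(lines):
--         if line.startswith("- module-name: "):
--             for entry in comments.get(line.split(": ")[1], ()):
--                 t = entry["type"]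
--                 if t == "on-top":
--                     ops.append(("ins", i + r, entry["comment"]))
--                     r += 1
--                 elif t == "between":
--                     j = next(k for k in occ[entry["key"]] if k >= i)
--                     ops.append(("ins", j + r + 1, entry["comment"]))
--                     r += 1
--                 elif t == "on-end":
--                     j = next(k for k in occ[entry["key"]] if k >= i)
--                     ops.append(("set", j + r, lines[j] + " " + entry["comment"]))
--
--     # phase 2: replay the operation list in a single uniform fold
--     new_lines = list(lines)
--     for kind, idx, text in ops:
--         if kind == "ins":
--             new_lines.insert(idx, text)
--         else:
--             new_lines[idx] = text
--     return new_lines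
-- ===== Notes on version B (the rewrite author's own statement) =====
-- stated objective: faster
-- what changed: B is a two-phase compiler/replayer: pass 1 resolves every comment entry (via a stripped-text-to-positions index) into a flat list of absolute insert/set operations with precomputed insert ranks, pass 2 replays that operation list in one uniform fold, so A's per-entry forward line scans and interleaved counter bookkeeping disappear.
import Mathlib
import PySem

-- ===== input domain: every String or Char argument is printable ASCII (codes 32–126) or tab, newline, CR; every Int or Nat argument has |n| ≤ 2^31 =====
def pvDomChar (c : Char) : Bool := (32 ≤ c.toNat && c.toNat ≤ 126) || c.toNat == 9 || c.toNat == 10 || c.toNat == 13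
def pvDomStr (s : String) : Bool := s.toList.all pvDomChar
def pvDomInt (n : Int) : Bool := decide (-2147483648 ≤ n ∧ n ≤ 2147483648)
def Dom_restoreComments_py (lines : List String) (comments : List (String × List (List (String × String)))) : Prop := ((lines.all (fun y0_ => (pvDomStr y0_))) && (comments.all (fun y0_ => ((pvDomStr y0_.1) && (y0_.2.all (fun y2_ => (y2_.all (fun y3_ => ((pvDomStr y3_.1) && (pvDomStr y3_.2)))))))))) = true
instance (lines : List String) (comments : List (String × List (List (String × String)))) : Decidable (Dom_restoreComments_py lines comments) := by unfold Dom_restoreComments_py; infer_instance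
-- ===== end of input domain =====

-- B is a two-phase compiler/replayer: pass 1 resolves every comment entry (key lines found via a
-- stripped-text → positions index) into a flat list of absolute insert/set operations with
-- precomputed insert ranks; pass 2 replays that operation list in one uniform fold, so A's
-- interleaved per-entry forward line scans and counter bookkeeping disappear.
-- Pre_ only excludes inputs where the Python A raises.

-- ===== PORT A =====
-- A's inner `while` scan: first index j' ≥ j with lines[j'].strip() == key (none = IndexError)
def pvScanA (lines : List String) (key : String) (j : Nat) : Option Nat :=
  match h : lines[j]? with
  | none => none
  | some l => if PySem.Str.strip l = key then some j else pvScanA lines key (j + 1)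
termination_by lines.length - j
decreasing_by
  have : j < lines.length := List.getElem?_eq_some_iff.mp h |>.1
  omega

-- one entry of A's inner `for entry in comments[module_name]` loop (three sequential ifs)
def pvStepA (lines : List String) (i : Nat) (st : List String × Int)
    (entry : List (String × String)) : List String × Int :=
  let t := (entry.lookup "type").getD ""
  let st1 := if t = "on-top" then
      (PySem.List.insert st.1 ((i : Int) + st.2) ((entry.lookup "comment").getD ""), st.2 + 1)
    else st
  let st2 := if t = "between" then
      match pvScanA lines ((entry.lookup "key").getD "") i with
      | some j => (PySem.List.insert st1.1 ((j : Int) + st1.2 + 1) ((entry.lookup "comment").getD ""), st1.2 + 1)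
      | none => st1
    else st1
  if t = "on-end" then
    match pvScanA lines ((entry.lookup "key").getD "") i with
    | some j => (PySem.List.pySetD st2.1 ((j : Int) + st2.2)
        (((PySem.List.pyGet? lines (j : Int)).getD "") ++ " " ++ ((entry.lookup "comment").getD "")), st2.2)
    | none => st2
  else st2

def restoreComments_py (lines : List String) (comments : List (String × List (List (String × String)))) : List String :=
  ((PySem.List.enumerate lines).foldl (fun st p =>
      if PySem.Str.startswith p.2 "- module-name: " then
        match comments.lookup ((((PySem.Str.split? p.2 ": ").getD [])[1]?).getD "") with
        | some entries => entries.foldl (pvStepA lines p.1.toNat) st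
        | none => st
      else st) (lines, (0 : Int))).1

-- ===== PORT B =====
-- pass-1 index: stripped line text → ascending list of its positions
-- (Source B's setdefault(...).append(j) ported as an overwriting insert of the extended list)
def pvOcc (lines : List String) : PySem.Dict String (List Nat) :=
  (PySem.List.enumerate lines).foldl
    (fun d p => d.insert (PySem.Str.strip p.2) ((d.getD (PySem.Str.strip p.2) []) ++ [p.1.toNat]))
    PySem.Dict.empty

-- compile one entry into at most one resolved op, threading the insert rank
-- (`next(k for k in occ[key] if k >= i)` = find?)
def pvCompEntry (lines : List String) (occ : PySem.Dict String (List Nat)) (i : Nat)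
    (st : List (String × Int × String) × Int) (entry : List (String × String)) :
    List (String × Int × String) × Int :=
  let t := (entry.lookup "type").getD ""
  if t = "on-top" then
    (st.1 ++ [("ins", (i : Int) + st.2, (entry.lookup "comment").getD "")], st.2 + 1)
  else if t = "between" then
    match (occ.getD ((entry.lookup "key").getD "") []).find? (fun k => decide (i ≤ k)) with
    | some j => (st.1 ++ [("ins", (j : Int) + st.2 + 1, (entry.lookup "comment").getD "")], st.2 + 1)
    | none => st
  else if t = "on-end" then
    match (occ.getD ((entry.lookup "key").getD "") []).find? (fun k => decide (i ≤ k)) with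
    | some j => (st.1 ++ [("set", (j : Int) + st.2,
        ((PySem.List.pyGet? lines (j : Int)).getD "") ++ " " ++ ((entry.lookup "comment").getD ""))], st.2)
    | none => st
  else st

-- pass 2: apply one operation
def pvReplay (l : List String) (op : String × Int × String) : List String :=
  if op.1 = "ins" then PySem.List.insert l op.2.1 op.2.2
  else PySem.List.pySetD l op.2.1 op.2.2

def restoreComments_py_alt (lines : List String) (comments : List (String × List (List (String × String)))) : List String :=
  let occ := pvOcc lines
  let ops := ((PySem.List.enumerate lines).foldl (fun st p =>
      if PySem.Str.startswith p.2 "- module-name: " then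
        match comments.lookup ((((PySem.Str.split? p.2 ": ").getD [])[1]?).getD "") with
        | some entries => entries.foldl (pvCompEntry lines occ p.1.toNat) st
        | none => st
      else st) ([], (0 : Int))).1
  ops.foldl pvReplay lines

-- ===== PRECONDITION & SPEC =====
-- Pre_ excludes exactly the inputs where the Python A raises: an entry of a matched module
-- missing the "type" key, an on-top entry missing "comment", or a between/on-end entry missing
-- "key"/"comment" or whose key text never occurs (stripped) at or after the module line
-- (KeyError / IndexError in A; B raises there too).
def pvKeyFound (lines : List String) (i : Nat) (key : String) : Bool :=
  (List.range lines.length).any (fun j => decide (i ≤ j) && (PySem.Str.strip (lines.getD j "") == key))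

def pvEntryOk (lines : List String) (i : Nat) (e : List (String × String)) : Bool :=
  match e.lookup "type" with
  | none => false
  | some t =>
    if t = "on-top" then (e.lookup "comment").isSome
    else if t = "between" || t = "on-end" then
      (e.lookup "key").isSome && (e.lookup "comment").isSome &&
        pvKeyFound lines i ((e.lookup "key").getD "")
    else true

def Pre_restoreComments_py (lines : List String) (comments : List (String × List (List (String × String)))) : Prop :=
  ((PySem.List.enumerate lines).all (fun p =>
    !(PySem.Str.startswith p.2 "- module-name: ") ||
    (match comments.lookup ((((PySem.Str.split? p.2 ": ").getD [])[1]?).getD "") with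
     | none => true
     | some es => es.all (pvEntryOk lines p.1.toNat)))) = true
instance (lines : List String) (comments : List (String × List (List (String × String)))) : Decidable (Pre_restoreComments_py lines comments) := by unfold Pre_restoreComments_py; infer_instance

def pvWitness_restoreComments_py : List String × (List (String × List (List (String × String)))) :=
  (["- module-name: m", "  anti-bloat:"],
   [("m", [[("type", "on-top"), ("comment", "# top")],
           [("type", "on-end"), ("key", "anti-bloat:"), ("comment", "# end")]])])

def Spec_restoreComments_py (lines : List String) (comments : List (String × List (List (String × String)))) (out : List String) : Prop := out = restoreComments_py_alt lines comments
instance (lines : List String) (comments : List (String × List (List (String × String)))) (out : List String) : Decidable (Spec_restoreComments_py lines comments out) := by unfold Spec_restoreComments_py; infer_instance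

-- ===== CLAIM (what is proved, stated in full; the proofs are below) =====
def Claim_equal_restoreComments_py : Prop := ∀ (lines : List String) (comments : List (String × List (List (String × String)))), Dom_restoreComments_py lines comments → Pre_restoreComments_py lines comments → Spec_restoreComments_py lines comments (restoreComments_py lines comments)

-- ===== LEMMAS AND PROOFS =====

-- proof-side spelling of occ[key]: the ascending positions j (offset s) with lines[j].strip() = key
def pvOccList (key : String) : List String → Nat → List Nat
  | [], _ => []
  | l :: rest, j => if PySem.Str.strip l = key then j :: pvOccList key rest (j + 1) else pvOccList key rest (j + 1)

theorem pvOcc_fold (ls : List String) : ∀ (s : Nat) (d : PySem.Dict String (List Nat)) (key : String),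
    ((PySem.List.enumerate ls (s : Int)).foldl
        (fun d p => d.insert (PySem.Str.strip p.2) ((d.getD (PySem.Str.strip p.2) []) ++ [p.1.toNat])) d).getD key []
      = d.getD key [] ++ pvOccList key ls s := by
  induction ls with
  | nil => intro s d key; simp [PySem.List.enumerate_nil, pvOccList]
  | cons x xs ih =>
    intro s d key
    rw [PySem.List.enumerate_cons]
    have h1 : (s : Int) + 1 = ((s + 1 : Nat) : Int) := by push_cast; ring
    rw [List.foldl_cons, h1, ih]
    rw [PySem.Dict.getD_insert]
    by_cases hk : key = PySem.Str.strip x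
    · simp [pvOccList, hk, Int.toNat_natCast]
    · have : ¬ PySem.Str.strip x = key := fun h => hk h.symm
      simp [pvOccList, hk, this]

theorem pvOcc_getD (lines : List String) (key : String) :
    (pvOcc lines).getD key [] = pvOccList key lines 0 := by
  have h := pvOcc_fold lines 0 PySem.Dict.empty key
  simpa [pvOcc] using h

theorem pvOccList_lb (key : String) : ∀ (ls : List String) (s j : Nat), j ∈ pvOccList key ls s → s ≤ j := by
  intro ls
  induction ls with
  | nil => intro s j h; simp [pvOccList] at h
  | cons x xs ih =>
    intro s j h
    by_cases hk : PySem.Str.strip x = key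
    · simp [pvOccList, hk] at h
      rcases h with h | h
      · omega
      · have := ih (s + 1) j h; omega
    · simp [pvOccList, hk] at h
      have := ih (s + 1) j h; omega

theorem pvOccList_ub (key : String) : ∀ (ls : List String) (s j : Nat), j ∈ pvOccList key ls s → j < s + ls.length := by
  intro ls
  induction ls with
  | nil => intro s j h; simp [pvOccList] at h
  | cons x xs ih =>
    intro s j h
    by_cases hk : PySem.Str.strip x = key
    · simp [pvOccList, hk] at h
      rcases h with h | h
      · simp [h]
      · have := ih (s + 1) j h; simp; omega
    · simp [pvOccList, hk] at h
      have := ih (s + 1) j h; simp; omega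

theorem pvOccList_append (key : String) : ∀ (xs ys : List String) (s : Nat),
    pvOccList key (xs ++ ys) s = pvOccList key xs s ++ pvOccList key ys (s + xs.length) := by
  intro xs
  induction xs with
  | nil => intro ys s; simp [pvOccList]
  | cons x t ih =>
    intro ys s
    by_cases hk : PySem.Str.strip x = key <;>
      simp [pvOccList, hk, ih ys (s + 1)] <;> ring_nf

theorem pvScanA_head (lines : List String) (key : String) : ∀ (i : Nat),
    pvScanA lines key i = (pvOccList key (lines.drop i) i).head? := by
  intro i
  induction' hn : lines.length - i using Nat.strong_induction_on with n ih generalizing i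
  by_cases hi : i < lines.length
  · have hd : lines.drop i = lines[i] :: lines.drop (i + 1) := List.drop_eq_getElem_cons hi
    rw [pvScanA, List.getElem?_eq_getElem hi, hd]
    by_cases hk : PySem.Str.strip lines[i] = key
    · simp [pvOccList, hk]
    · have hrec := ih (lines.length - (i + 1)) (by omega) (i + 1) rfl
      simp [pvOccList, hk, hrec]
  · have hd : lines.drop i = [] := List.drop_eq_nil_of_le (by omega)
    rw [pvScanA, List.getElem?_eq_none_iff.mpr (by omega), hd]
    simp [pvOccList]

theorem find?_all_pos {p : Nat → Bool} {l : List Nat} (h : ∀ x ∈ l, p x = true) :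
    l.find? p = l.head? := by
  cases l with
  | nil => rfl
  | cons a t => simp [List.find?_cons_of_pos (h a (by simp))]

theorem pvFind_occ (lines : List String) (key : String) (i : Nat) :
    (pvOccList key lines 0).find? (fun k => decide (i ≤ k)) = pvScanA lines key i := by
  conv_lhs => rw [← List.take_append_drop i lines]
  rw [pvOccList_append, List.find?_append]
  have h1 : (pvOccList key (lines.take i) 0).find? (fun k => decide (i ≤ k)) = none := by
    apply List.find?_eq_none.mpr
    intro j hj
    have := pvOccList_ub key (lines.take i) 0 j hj
    simp at this ⊢
    omega
  have hlen : 0 + (lines.take i).length = min i lines.length := by simp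
  rw [h1, hlen]
  rw [Option.none_or]
  by_cases hi : i ≤ lines.length
  · have hmin : min i lines.length = i := by omega
    rw [hmin, pvScanA_head]
    apply find?_all_pos
    intro x hx
    have := pvOccList_lb key (lines.drop i) i x hx
    simpa using this
  · have hd : lines.drop i = [] := List.drop_eq_nil_of_le (by omega)
    rw [hd, pvScanA_head, hd]
    simp [pvOccList]

-- the compile step only appends: folding it from (ops, c) prefixes ops to the result from ([], c)
theorem pvCompEntry_append (lines : List String) (occ : PySem.Dict String (List Nat)) (i : Nat)
    (ops : List (String × Int × String)) (c : Int) (e : List (String × String)) :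
    pvCompEntry lines occ i (ops, c) e
      = (ops ++ (pvCompEntry lines occ i ([], c) e).1, (pvCompEntry lines occ i ([], c) e).2) := by
  simp only [pvCompEntry]
  split_ifs with h1 h2 h3 <;> try simp
  · cases (occ.getD ((e.lookup "key").getD "") []).find? (fun k => decide (i ≤ k)) <;> simp
  · cases (occ.getD ((e.lookup "key").getD "") []).find? (fun k => decide (i ≤ k)) <;> simp

-- generic staging lemma: a fold whose compile step only appends and whose single-item effect
-- equals replaying its compiled ops, equals replaying the whole compiled op list
theorem pvStage {α : Type}
    (fC : (List (String × Int × String) × Int) → α → (List (String × Int × String) × Int))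
    (happ : ∀ ops c a, fC (ops, c) a = (ops ++ (fC ([], c) a).1, (fC ([], c) a).2)) :
    ∀ (xs : List α) (ops : List (String × Int × String)) (c : Int),
      xs.foldl fC (ops, c) = (ops ++ (xs.foldl fC ([], c)).1, (xs.foldl fC ([], c)).2) := by
  intro xs
  induction xs with
  | nil => intro ops c; simp
  | cons x t ih =>
    intro ops c
    rw [List.foldl_cons, List.foldl_cons, happ ops c x, happ [] c x, List.nil_append]
    rw [ih (ops ++ (fC ([], c) x).1) ((fC ([], c) x).2), ih ((fC ([], c) x).1) ((fC ([], c) x).2)]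
    simp

theorem pvStage2 {α : Type}
    (fA : (List String × Int) → α → (List String × Int))
    (fC : (List (String × Int × String) × Int) → α → (List (String × Int × String) × Int))
    (happ : ∀ ops c a, fC (ops, c) a = (ops ++ (fC ([], c) a).1, (fC ([], c) a).2))
    (hstep : ∀ l c a, fA (l, c) a = ((fC ([], c) a).1.foldl pvReplay l, (fC ([], c) a).2)) :
    ∀ (xs : List α) (l : List String) (c : Int),
      xs.foldl fA (l, c) = ((xs.foldl fC ([], c)).1.foldl pvReplay l, (xs.foldl fC ([], c)).2) := by
  intro xs
  induction xs with
  | nil => intro l c; simp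
  | cons x t ih =>
    intro l c
    rw [List.foldl_cons, List.foldl_cons, hstep l c x, happ [] c x, List.nil_append]
    rw [ih ((fC ([], c) x).1.foldl pvReplay l) ((fC ([], c) x).2)]
    rw [pvStage fC happ t ((fC ([], c) x).1) ((fC ([], c) x).2)]
    simp [List.foldl_append]

-- one entry: A's interleaved step equals compiling (with rank = A's counter) then replaying
theorem pvStepA_comp (lines : List String) (i : Nat) (l : List String) (c : Int)
    (e : List (String × String)) :
    pvStepA lines i (l, c) e
      = ((pvCompEntry lines (pvOcc lines) i ([], c) e).1.foldl pvReplay l,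
         (pvCompEntry lines (pvOcc lines) i ([], c) e).2) := by
  simp only [pvStepA, pvCompEntry, pvOcc_getD, pvFind_occ]
  by_cases h1 : (e.lookup "type").getD "" = "on-top"
  · simp [h1, pvReplay]
  · by_cases h2 : (e.lookup "type").getD "" = "between"
    · simp only [h2, if_true]
      cases pvScanA lines ((e.lookup "key").getD "") i <;> simp [pvReplay]
    · by_cases h3 : (e.lookup "type").getD "" = "on-end"
      · simp only [h3, if_true]
        cases pvScanA lines ((e.lookup "key").getD "") i <;> simp [pvReplay]
      · simp [h1, h2, h3]

-- ===== VERDICT (by name: the statement is the Claim_ definition above) =====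
theorem restoreComments_py_spec : Claim_equal_restoreComments_py := by
  intro lines comments _ _
  simp only [Spec_restoreComments_py, restoreComments_py, restoreComments_py_alt]
  set fA := (fun (st : List String × Int) (p : Int × String) =>
      if PySem.Str.startswith p.2 "- module-name: " then
        match comments.lookup ((((PySem.Str.split? p.2 ": ").getD [])[1]?).getD "") with
        | some entries => entries.foldl (pvStepA lines p.1.toNat) st
        | none => st
      else st) with hfA
  set fC := (fun (st : List (String × Int × String) × Int) (p : Int × String) =>
      if PySem.Str.startswith p.2 "- module-name: " then
        match comments.lookup ((((PySem.Str.split? p.2 ": ").getD [])[1]?).getD "") with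
        | some entries => entries.foldl (pvCompEntry lines (pvOcc lines) p.1.toNat) st
        | none => st
      else st) with hfC
  have happE := pvCompEntry_append lines (pvOcc lines)
  have hstepE := fun i => pvStepA_comp lines i
  have happ : ∀ ops c p, fC (ops, c) p = (ops ++ (fC ([], c) p).1, (fC ([], c) p).2) := by
    intro ops c p
    simp only [hfC]
    by_cases hs : PySem.Str.startswith p.2 "- module-name: " = true
    · simp only [hs, if_true]
      cases comments.lookup ((((PySem.Str.split? p.2 ": ").getD [])[1]?).getD "") with
      | none => simp
      | some es => exact pvStage _ (happE p.1.toNat) es ops c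
    · simp only [Bool.not_eq_true] at hs
      simp only [hs]
      simp
  have hstep : ∀ l c p, fA (l, c) p = ((fC ([], c) p).1.foldl pvReplay l, (fC ([], c) p).2) := by
    intro l c p
    simp only [hfA, hfC]
    by_cases hs : PySem.Str.startswith p.2 "- module-name: " = true
    · simp only [hs, if_true]
      cases comments.lookup ((((PySem.Str.split? p.2 ": ").getD [])[1]?).getD "") with
      | none => simp
      | some es => exact pvStage2 _ _ (happE p.1.toNat) (hstepE p.1.toNat) es l c
    · simp only [Bool.not_eq_true] at hs
      simp only [hs]
      simp
  rw [pvStage2 fA fC happ hstep (PySem.List.enumerate lines) lines 0]
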